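-- pv_equiv track=rewrite | github.com/marton2307/semana1 | semana4/codiOptim.py | maximo_y_suma
-- ===== SOURCE A (Python) =====
-- def maximo_y_suma(lista):
--     maximo = lista[0]
--     suma = 0
--     for num in lista:
--         if num > maximo:
--             maximo = num
--             suma += num
--     return maximo, suma
-- ===== SOURCE B (Python) =====
-- def maximo_y_suma(lista):
--     prefix = lista[:1]
--     for x in lista[1:]:
--         prefix.append(prefix[-1] if prefix[-1] >= x else x)
--     suma = sum(x for x, p in zip(lista[1:], prefix) if x > p)
--     return prefix[-1], suma
-- ===== Notes on version B (the rewrite author's own statement) =====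
-- stated objective: alternative
-- what changed: Replaces the single running-max accumulator loop (conditionally updating max and sum together) by a two-phase decomposition: first build a prefix-maximum table, then take the maximum as its last entry and the sum via zip of the tail with the table, filtering elements that strictly exceed the max of their prefix.
import Mathlib
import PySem

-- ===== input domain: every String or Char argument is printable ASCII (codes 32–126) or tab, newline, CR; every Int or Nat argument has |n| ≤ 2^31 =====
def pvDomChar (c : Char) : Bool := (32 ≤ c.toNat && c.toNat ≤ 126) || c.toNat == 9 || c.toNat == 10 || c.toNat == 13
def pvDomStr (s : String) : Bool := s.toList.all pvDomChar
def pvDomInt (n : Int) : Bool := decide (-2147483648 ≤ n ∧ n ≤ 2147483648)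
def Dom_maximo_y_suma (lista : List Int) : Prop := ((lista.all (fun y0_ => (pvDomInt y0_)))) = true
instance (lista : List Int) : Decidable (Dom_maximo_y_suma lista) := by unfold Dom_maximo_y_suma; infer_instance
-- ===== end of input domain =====

-- B builds a prefix-maximum table first, then reads the maximum off its last entry and sums the tail elements exceeding their pref maximum (zip), instead of A's single running-max accumulator loop; same result.

-- ===== PORT A =====
def maximo_y_suma (lista : List Int) : Int × Int :=
  match lista with
  | [] => (0, 0)  -- lista[0] raises IndexError in Python: excluded by Pre_
  | h :: _ =>
    lista.foldl (fun st num => if st.1 < num then (num, st.2 + num) else st) (h, 0)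

-- ===== PORT B =====
def maximo_y_suma_alt (lista : List Int) : Int × Int :=
  let pref := (PySem.List.slice lista (some 1) none).foldl
    (fun acc x => acc ++ [if x ≤ (PySem.List.pyGet? acc (-1)).getD 0
                          then (PySem.List.pyGet? acc (-1)).getD 0 else x])
    (PySem.List.slice lista none (some 1))   -- lista[:1]
  let suma := ((PySem.List.slice lista (some 1) none).zip pref).foldl
    (fun s q => if q.2 < q.1 then s + q.1 else s) 0
  ((PySem.List.pyGet? pref (-1)).getD 0, suma)

-- ===== PRECONDITION & SPEC =====
-- Pre_ excludes only the empty list, on which A raises IndexError (lista[0]).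
def Pre_maximo_y_suma (lista : List Int) : Prop := lista ≠ []
instance (lista : List Int) : Decidable (Pre_maximo_y_suma lista) := by unfold Pre_maximo_y_suma; infer_instance
def pvWitness_maximo_y_suma : List Int := [3, 1, 5, 5, 7]
def Spec_maximo_y_suma (lista : List Int) (out : Int × Int) : Prop := out = maximo_y_suma_alt lista
instance (lista : List Int) (out : Int × Int) : Decidable (Spec_maximo_y_suma lista out) := by unfold Spec_maximo_y_suma; infer_instance

-- ===== CLAIM (what is proved, stated in full; the proofs are below) =====
def Claim_equal_maximo_y_suma : Prop := ∀ (lista : List Int), Dom_maximo_y_suma lista → Pre_maximo_y_suma lista → Spec_maximo_y_suma lista (maximo_y_suma lista)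

-- ===== LEMMAS AND PROOFS =====

-- new-maxima sum starting from running max m (proof-only characterisation)
def pvT (m : Int) : List Int → Int
  | [] => 0
  | x :: xs => if m < x then x + pvT x xs else pvT m xs

lemma pvA_fold (l : List Int) : ∀ (m s : Int),
    l.foldl (fun st num => if st.1 < num then (num, st.2 + num) else st) (m, s)
      = (l.foldl max m, s + pvT m l) := by
  induction l with
  | nil => intro m s; simp [pvT]
  | cons x xs ih =>
    intro m s
    by_cases h : m < x
    · simp [List.foldl_cons, h, pvT, ih, max_eq_right h.le, add_assoc]
    · simp [List.foldl_cons, h, pvT, ih, max_eq_left (not_lt.mp h)]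

-- the prefix-maximum table B builds, starting from a seen maximum m (proof-only characterisation)
def pvScan (m : Int) : List Int → List Int
  | [] => []
  | x :: xs => max m x :: pvScan (max m x) xs

lemma pvScan_getLast? (t : List Int) : ∀ (m : Int),
    (m :: pvScan m t).getLast? = some (t.foldl max m) := by
  induction t with
  | nil => intro m; simp [pvScan]
  | cons x xs ih =>
    intro m
    rw [pvScan, List.getLast?_cons_cons, ih (max m x), List.foldl_cons]

lemma pvBuild_eq (t : List Int) : ∀ (pre : List Int) (lastv : Int), pre.getLast? = some lastv →
    t.foldl (fun acc x => acc ++ [if x ≤ (PySem.List.pyGet? acc (-1)).getD 0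
                                  then (PySem.List.pyGet? acc (-1)).getD 0 else x]) pre
      = pre ++ pvScan lastv t := by
  induction t with
  | nil => intro pre lastv _; simp [pvScan]
  | cons x xs ih =>
    intro pre lastv hlast
    rw [List.foldl_cons]
    have hstep : (if x ≤ (PySem.List.pyGet? pre (-1)).getD 0
                  then (PySem.List.pyGet? pre (-1)).getD 0 else x) = max lastv x := by
      rw [PySem.List.pyGet?_neg_one, hlast, Option.getD_some, max_comm, max_def]
    rw [hstep, ih (pre ++ [max lastv x]) (max lastv x) (by simp), pvScan, List.append_assoc]
    rfl

lemma pvZip_sum (t : List Int) : ∀ (m s : Int),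
    ((t.zip (m :: pvScan m t)).foldl (fun s q => if q.2 < q.1 then s + q.1 else s) s)
      = s + pvT m t := by
  induction t with
  | nil => intro m s; simp [pvT]
  | cons x xs ih =>
    intro m s
    rw [pvScan, List.zip_cons_cons, List.foldl_cons]
    by_cases h : m < x
    · simp only [h, if_true]
      rw [ih (max m x) (s + x), max_eq_right h.le, pvT, if_pos h, add_assoc]
    · simp only [h, if_false]
      rw [ih (max m x) s, max_eq_left (not_lt.mp h), pvT, if_neg h]

-- ===== VERDICT (by name: the statement is the Claim_ definition above) =====
theorem maximo_y_suma_spec : Claim_equal_maximo_y_suma := by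
  intro lista _ hpre
  unfold Spec_maximo_y_suma
  cases lista with
  | nil => exact absurd rfl hpre
  | cons h t =>
    simp only [maximo_y_suma, maximo_y_suma_alt]
    rw [pvA_fold]
    have hs1 : PySem.List.slice (h :: t) (some 1) none = t := by
      rw [PySem.List.slice_from (h :: t) (by norm_num)]; rfl
    have hs0 : PySem.List.slice (h :: t) none (some 1) = [h] := by
      rw [PySem.List.slice_to (h :: t) (by norm_num)]; rfl
    have hbuild := pvBuild_eq t [h] h (by simp)
    simp only [hs1, hs0, hbuild, List.singleton_append]
    rw [PySem.List.pyGet?_neg_one, pvScan_getLast?, Option.getD_some,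
        pvZip_sum t h 0, List.foldl_cons, max_self]
    simp [pvT]
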